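-- pv_equiv track=rewrite | github.com/yy-degit/Scented-EAE | trainer/framework.py | remove_pad
-- ===== SOURCE A (Python) =====
-- def remove_pad(pad_lists, pad_value):
--     remove_pad_lists = list()
--     for one in pad_lists:
--         if pad_value in one:
--             remove_pad_lists.append(one[:one.index(pad_value)])
--         else:
--             remove_pad_lists.append(one)
--     return remove_pad_lists
-- ===== SOURCE B (Python) =====
-- def remove_pad(pad_lists, pad_value):
--     def trim(one):
--         out = []
--         for v in one:
--             if v == pad_value:
--                 return out
--             out.append(v)
--         return out
--     return [trim(one) for one in pad_lists]
-- ===== Notes on version B (the rewrite author's own statement) =====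
-- stated objective: simpler
-- what changed: Replaces the two sequential scans per sublist (membership test, then .index) plus slice with a single pass that copies elements until the first pad_value, mapped over the outer list.
import Mathlib
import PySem

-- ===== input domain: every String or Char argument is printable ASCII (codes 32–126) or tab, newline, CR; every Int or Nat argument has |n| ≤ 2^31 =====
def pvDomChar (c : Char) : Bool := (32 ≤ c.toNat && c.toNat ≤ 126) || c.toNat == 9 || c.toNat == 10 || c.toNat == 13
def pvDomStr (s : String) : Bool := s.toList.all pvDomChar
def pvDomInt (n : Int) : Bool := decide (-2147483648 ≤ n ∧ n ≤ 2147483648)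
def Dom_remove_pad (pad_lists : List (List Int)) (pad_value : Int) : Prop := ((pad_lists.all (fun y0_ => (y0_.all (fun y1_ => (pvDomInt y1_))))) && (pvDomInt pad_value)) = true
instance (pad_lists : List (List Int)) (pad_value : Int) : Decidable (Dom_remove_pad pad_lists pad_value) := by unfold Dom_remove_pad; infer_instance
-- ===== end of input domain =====

-- B: one pass per sublist, copying elements until the first pad_value (simpler; no membership test, no .index, no slice).
-- ===== PORT A =====
-- 'one.index(pad_value)' is guarded by 'pad_value in one', so index? is some there; getD 0 is never the default.
def remove_pad (pad_lists : List (List Int)) (pad_value : Int) : List (List Int) :=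
  pad_lists.foldl (fun acc one =>
    if one.contains pad_value then
      acc ++ [PySem.List.slice one none
        (some (((PySem.List.index? one pad_value).getD 0 : Nat) : Int))]
    else
      acc ++ [one]) []

-- ===== PORT B =====
def trimToPad (pad_value : Int) : List Int → List Int
  | [] => []
  | v :: rest => if v == pad_value then [] else v :: trimToPad pad_value rest

def remove_pad_alt (pad_lists : List (List Int)) (pad_value : Int) : List (List Int) :=
  pad_lists.map (trimToPad pad_value)

-- ===== PRECONDITION & SPEC =====
def Spec_remove_pad (pad_lists : List (List Int)) (pad_value : Int) (out : List (List Int)) : Prop := out = remove_pad_alt pad_lists pad_value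
instance (pad_lists : List (List Int)) (pad_value : Int) (out : List (List Int)) : Decidable (Spec_remove_pad pad_lists pad_value out) := by unfold Spec_remove_pad; infer_instance

-- ===== CLAIM (what is proved, stated in full; the proofs are below) =====
def Claim_equal_remove_pad : Prop := ∀ (pad_lists : List (List Int)) (pad_value : Int), Dom_remove_pad pad_lists pad_value → Spec_remove_pad pad_lists pad_value (remove_pad pad_lists pad_value)

-- ===== LEMMAS AND PROOFS =====

-- ===== VERDICT (by name: the statement is the Claim_ definition above) =====
lemma body_eq_trim (p : Int) (one : List Int) :
    (if one.contains p then
      PySem.List.slice one none (some (((PySem.List.index? one p).getD 0 : Nat) : Int))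
     else one) = trimToPad p one := by
  induction one with
  | nil => simp [trimToPad]
  | cons v rest ih =>
    by_cases hv : v = p
    · subst hv
      rw [if_pos (by simp), PySem.List.index?_cons_self]
      simp only [Option.getD_some]
      rw [PySem.List.slice_to_natCast]
      simp [trimToPad]
    · rw [PySem.List.index?_cons_of_ne rest hv]
      by_cases hm : p ∈ rest
      · obtain ⟨k, hk⟩ := Option.isSome_iff_exists.mp ((PySem.List.index?_isSome_iff rest p).mpr hm)
        have hrest := ih
        rw [if_pos (by simpa using hm), hk] at hrest
        rw [hk, if_pos (by simp [hm])]
        simp only [Option.map_some, Option.getD_some] at hrest ⊢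
        rw [PySem.List.slice_to_natCast] at hrest ⊢
        have hvp : (v == p) = false := by simp [hv]
        simp only [List.take_succ_cons, trimToPad, hvp, Bool.false_eq_true, if_false, hrest]
      · have hn : PySem.List.index? rest p = none := (PySem.List.index?_eq_none_iff rest p).mpr hm
        have hrest := ih
        rw [if_neg (by simpa using hm)] at hrest
        rw [hn, if_neg (by simp; exact ⟨fun h => hv h.symm, hm⟩)]
        have hvp : (v == p) = false := by simp [hv]
        simp only [trimToPad, hvp, Bool.false_eq_true, if_false]
        rw [← hrest]

lemma foldl_remove_pad (p : Int) (ls acc : List (List Int)) :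
    ls.foldl (fun acc one =>
      if one.contains p then
        acc ++ [PySem.List.slice one none (some (((PySem.List.index? one p).getD 0 : Nat) : Int))]
      else acc ++ [one]) acc = acc ++ ls.map (trimToPad p) := by
  induction ls generalizing acc with
  | nil => simp
  | cons one rest ih =>
    simp only [List.foldl_cons, List.map_cons]
    have h := body_eq_trim p one
    by_cases hc : one.contains p = true
    · rw [if_pos hc] at h
      rw [if_pos hc, ih, h]
      simp
    · rw [if_neg hc] at h
      rw [if_neg hc, ih]
      conv_rhs => rw [← h]
      simp

theorem remove_pad_spec : Claim_equal_remove_pad := by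
  intro pad_lists pad_value _
  unfold Spec_remove_pad remove_pad remove_pad_alt
  simpa using foldl_remove_pad pad_value pad_lists []
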